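-- pv_equiv track=rewrite | github.com/sanderoman/kuccps-career-hub | backend/routes/institution_routes.py | _get_breakdown_by_type
-- ===== SOURCE A (Python) =====
-- def _get_breakdown_by_type(institutions):
--     """Get breakdown of institutions by type"""
--     universities = len([i for i in institutions if i['type'].lower() == 'university'])
--     tech_colleges = len([i for i in institutions if i['type'].lower() == 'technical college'])
--     diploma_colleges = len([i for i in institutions if i['type'].lower() == 'diploma college'])
--
--     return {
--         'universities': universities,
--         'technical_colleges': tech_colleges,
--         'diploma_colleges': diploma_colleges
--     }
-- ===== SOURCE B (Python) =====
-- def _get_breakdown_by_type(institutions):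
--     """Get breakdown of institutions by type"""
--     universities = tech_colleges = diploma_colleges = 0
--     for i in institutions:
--         t = i['type'].lower()
--         if t == 'university':
--             universities += 1
--         elif t == 'technical college':
--             tech_colleges += 1
--         elif t == 'diploma college':
--             diploma_colleges += 1
--     return {
--         'universities': universities,
--         'technical_colleges': tech_colleges,
--         'diploma_colleges': diploma_colleges
--     }
-- ===== Notes on version B (the rewrite author's own statement) =====
-- stated objective: faster
-- what changed: Replaces three separate list-comprehension scans of the whole list (one per category) by a single pass maintaining three counters.
import Mathlib
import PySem

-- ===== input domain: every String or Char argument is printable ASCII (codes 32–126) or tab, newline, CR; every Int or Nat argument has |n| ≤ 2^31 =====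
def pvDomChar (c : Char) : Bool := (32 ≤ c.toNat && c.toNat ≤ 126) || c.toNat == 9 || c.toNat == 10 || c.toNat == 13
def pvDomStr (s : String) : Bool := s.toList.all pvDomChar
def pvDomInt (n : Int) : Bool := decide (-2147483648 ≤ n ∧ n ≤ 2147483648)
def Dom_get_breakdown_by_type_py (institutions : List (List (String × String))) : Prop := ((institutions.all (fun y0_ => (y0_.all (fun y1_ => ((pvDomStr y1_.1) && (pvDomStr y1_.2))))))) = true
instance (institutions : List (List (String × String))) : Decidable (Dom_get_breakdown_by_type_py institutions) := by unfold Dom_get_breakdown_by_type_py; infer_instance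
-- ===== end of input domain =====

-- B replaces A's three separate filtering scans by one pass with three counters.
-- ===== PORT A =====
-- i['type'].lower(); get? none = KeyError, excluded by Pre_ (getD "" is never reached there)
def pvTypeLower (i : List (String × String)) : String :=
  PySem.Str.lower (((PySem.Dict.mk i).get? "type").getD "")

def get_breakdown_by_type_py (institutions : List (List (String × String))) : List (String × Int) :=
  let universities : Int := (institutions.filter (fun i => pvTypeLower i == "university")).length
  let tech_colleges : Int := (institutions.filter (fun i => pvTypeLower i == "technical college")).length
  let diploma_colleges : Int := (institutions.filter (fun i => pvTypeLower i == "diploma college")).length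
  [("universities", universities), ("technical_colleges", tech_colleges), ("diploma_colleges", diploma_colleges)]

-- ===== PORT B =====
def pvStep (acc : Int × Int × Int) (i : List (String × String)) : Int × Int × Int :=
  let t := pvTypeLower i
  if t == "university" then (acc.1 + 1, acc.2.1, acc.2.2)
  else if t == "technical college" then (acc.1, acc.2.1 + 1, acc.2.2)
  else if t == "diploma college" then (acc.1, acc.2.1, acc.2.2 + 1)
  else acc

def get_breakdown_by_type_py_alt (institutions : List (List (String × String))) : List (String × Int) :=
  let acc := institutions.foldl pvStep (0, 0, 0)
  [("universities", acc.1), ("technical_colleges", acc.2.1), ("diploma_colleges", acc.2.2)]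

-- ===== PRECONDITION & SPEC =====
-- Pre_ excludes institutions dicts missing the 'type' key, on which A (and B) raise KeyError.
def Pre_get_breakdown_by_type_py (institutions : List (List (String × String))) : Prop :=
  ∀ i ∈ institutions, ((PySem.Dict.mk i).get? "type").isSome
instance (institutions : List (List (String × String))) : Decidable (Pre_get_breakdown_by_type_py institutions) := by unfold Pre_get_breakdown_by_type_py; infer_instance
def pvWitness_get_breakdown_by_type_py : (List (List (String × String))) := [[("type", "University")], [("type", "other")]]

def Spec_get_breakdown_by_type_py (institutions : List (List (String × String))) (out : List (String × Int)) : Prop := out = get_breakdown_by_type_py_alt institutions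
instance (institutions : List (List (String × String))) (out : List (String × Int)) : Decidable (Spec_get_breakdown_by_type_py institutions out) := by unfold Spec_get_breakdown_by_type_py; infer_instance

-- ===== CLAIM (what is proved, stated in full; the proofs are below) =====
def Claim_equal_get_breakdown_by_type_py : Prop := ∀ (institutions : List (List (String × String))), Dom_get_breakdown_by_type_py institutions → Pre_get_breakdown_by_type_py institutions → Spec_get_breakdown_by_type_py institutions (get_breakdown_by_type_py institutions)

-- ===== LEMMAS AND PROOFS =====
lemma pv_fold_counts (l : List (List (String × String))) (u t d : Int) :
    l.foldl pvStep (u, t, d)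
    = (u + (l.filter (fun i => pvTypeLower i == "university")).length,
       t + (l.filter (fun i => pvTypeLower i == "technical college")).length,
       d + (l.filter (fun i => pvTypeLower i == "diploma college")).length) := by
  induction l generalizing u t d with
  | nil => simp
  | cons x xs ih =>
    rw [List.foldl_cons]
    simp only [pvStep, List.filter_cons]
    split_ifs with h1 h2 h3 <;>
      simp_all [ih, Prod.ext_iff] <;> push_cast <;> ring

-- ===== VERDICT (by name: the statement is the Claim_ definition above) =====
theorem get_breakdown_by_type_py_spec : Claim_equal_get_breakdown_by_type_py := by
  intro institutions _ _
  unfold Spec_get_breakdown_by_type_py get_breakdown_by_type_py get_breakdown_by_type_py_alt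
  simp only [pv_fold_counts]
  simp
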